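-- pv_equiv track=rewrite | github.com/Tomixbo/mangaka | mangaka/read_manga/utils.py | assign_text_to_panels
-- ===== SOURCE A (Python) =====
-- def assign_text_to_panels(panels, texts):
--     """
--     Assign texts to the panels they belong to.
--     """
--     panel_texts = {i: [] for i in range(len(panels))}
--     for text in texts:
--         x_min_t, y_min_t, x_max_t, y_max_t = text[:4]
--         for i, panel in enumerate(panels):
--             x_min_p, y_min_p, x_max_p, y_max_p = panel[:4]
--             if (x_min_t >= x_min_p and y_min_t >= y_min_p and
--                 x_max_t <= x_max_p and y_max_t <= y_max_p):
--                 panel_texts[i].append(text)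
--                 break
--     return panel_texts
-- ===== SOURCE B (Python) =====
-- def assign_text_to_panels(panels, texts):
--     """
--     Assign texts to the panels they belong to.
--     """
--     panel_texts = {}
--     remaining = list(texts)
--     for i, panel in enumerate(panels):
--         mine, rest = [], []
--         for text in remaining:
--             if (text[0] >= panel[0] and text[1] >= panel[1] and
--                     text[2] <= panel[2] and text[3] <= panel[3]):
--                 mine.append(text)
--             else:
--                 rest.append(text)
--         panel_texts[i] = mine
--         remaining = rest
--     return panel_texts
-- ===== Notes on version B (the rewrite author's own statement) =====
-- stated objective: alternative
-- what changed: B inverts the nesting: instead of A's text-major scan that breaks out of a panel loop and appends into a pre-initialized dict, B walks panels in index order and partitions a shrinking 'remaining' list of texts into this panel's group and the rest, so each text is consumed by its first containing panel and never rescanned.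
import Mathlib
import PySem

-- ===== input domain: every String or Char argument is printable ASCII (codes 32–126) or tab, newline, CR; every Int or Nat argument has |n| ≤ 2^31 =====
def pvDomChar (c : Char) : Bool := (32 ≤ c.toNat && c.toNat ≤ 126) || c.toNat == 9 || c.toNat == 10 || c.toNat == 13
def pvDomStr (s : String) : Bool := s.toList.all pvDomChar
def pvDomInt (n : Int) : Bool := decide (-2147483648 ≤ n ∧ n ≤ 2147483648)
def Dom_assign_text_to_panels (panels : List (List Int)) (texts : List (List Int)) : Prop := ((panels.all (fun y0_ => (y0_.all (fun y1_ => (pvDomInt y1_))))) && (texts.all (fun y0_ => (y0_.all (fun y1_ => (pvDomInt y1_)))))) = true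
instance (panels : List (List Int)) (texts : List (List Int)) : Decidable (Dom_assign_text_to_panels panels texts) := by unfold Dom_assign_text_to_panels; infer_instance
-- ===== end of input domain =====

-- B walks panels in index order and partitions a shrinking remaining-texts list per panel (panel-major), instead of A's text-major break-scan into a pre-initialized dict; alternative decomposition, same cost.


-- ===== PORT A =====
-- inner 'for i, panel in enumerate(panels): … break' loop of A
def pvAInner (text : List Int) (xt yt xT yT : Int) :
    List (Int × List Int) → PySem.Dict Int (List (List Int)) → PySem.Dict Int (List (List Int))
  | [], d => d
  | (i, panel) :: rest, d =>
    match PySem.List.slice panel (some 0) (some 4) with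
    | [xp, yp, xP, yP] =>
        if xt ≥ xp && yt ≥ yp && xT ≤ xP && yT ≤ yP then
          d.modify i [] (· ++ [text])          -- panel_texts[i].append(text); break
        else pvAInner text xt yt xT yT rest d
    | _ => d                                    -- 4-tuple unpack raises (outside Pre_)

def assign_text_to_panels (panels : List (List Int)) (texts : List (List Int)) :
    List (Int × List (List Int)) :=
  let init : PySem.Dict Int (List (List Int)) :=
    (PySem.List.pyRange 0 panels.length 1).foldl (fun d i => d.insert i []) PySem.Dict.empty
  (texts.foldl (fun d text =>
      match PySem.List.slice text (some 0) (some 4) with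
      | [xt, yt, xT, yT] => pvAInner text xt yt xT yT (PySem.List.enumerate panels 0) d
      | _ => d) init).items                     -- unpack raises (outside Pre_)

-- ===== PORT B =====
-- 'text[0] >= panel[0] and text[1] >= panel[1] and text[2] <= panel[2] and text[3] <= panel[3]'
-- (inside Pre_ every index succeeds, so the flat match is exact there; a failing index raises in Python, outside Pre_)
def pvBContains (panel text : List Int) : Bool :=
  match PySem.List.pyGet? text 0, PySem.List.pyGet? text 1, PySem.List.pyGet? text 2, PySem.List.pyGet? text 3,
        PySem.List.pyGet? panel 0, PySem.List.pyGet? panel 1, PySem.List.pyGet? panel 2, PySem.List.pyGet? panel 3 with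
  | some t0, some t1, some t2, some t3, some p0, some p1, some p2, some p3 =>
      t0 ≥ p0 && t1 ≥ p1 && t2 ≤ p2 && t3 ≤ p3
  | _, _, _, _, _, _, _, _ => false

-- inner loop of B: partition 'remaining' into (mine, rest), both built by append in order
def pvBSplit (panel : List Int) (remaining : List (List Int)) :
    List (List Int) × List (List Int) :=
  remaining.foldl (fun acc text =>
      if pvBContains panel text then (acc.1 ++ [text], acc.2) else (acc.1, acc.2 ++ [text]))
    ([], [])

def assign_text_to_panels_alt (panels : List (List Int)) (texts : List (List Int)) :
    List (Int × List (List Int)) :=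
  ((PySem.List.enumerate panels 0).foldl
      (fun (st : PySem.Dict Int (List (List Int)) × List (List Int)) ip =>
        let mr := pvBSplit ip.2 st.2
        (st.1.insert ip.1 mr.1, mr.2))
      (PySem.Dict.empty, texts)).1.items

-- ===== PRECONDITION & SPEC =====
-- Pre_ excludes inputs where 4-tuple unpacking of a short box raises ValueError in A (or a short
-- box indexes out of range in B); it is mildly narrower than that: panels beyond a text's first
-- containing panel are never unpacked by A, but Pre_ asks all panels to have length ≥ 4 when texts ≠ [].
def Pre_assign_text_to_panels (panels : List (List Int)) (texts : List (List Int)) : Prop :=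
  (∀ t ∈ texts, 4 ≤ t.length) ∧ (texts = [] ∨ ∀ p ∈ panels, 4 ≤ p.length)
instance (panels : List (List Int)) (texts : List (List Int)) : Decidable (Pre_assign_text_to_panels panels texts) := by unfold Pre_assign_text_to_panels; infer_instance

def pvWitness_assign_text_to_panels : List (List Int) × List (List Int) :=
  ([[0, 0, 10, 10], [5, 5, 20, 20]], [[1, 1, 2, 2], [6, 6, 19, 19], [50, 50, 60, 60]])

def Spec_assign_text_to_panels (panels : List (List Int)) (texts : List (List Int)) (out : List (Int × List (List Int))) : Prop := out = assign_text_to_panels_alt panels texts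
instance (panels : List (List Int)) (texts : List (List Int)) (out : List (Int × List (List Int))) : Decidable (Spec_assign_text_to_panels panels texts out) := by unfold Spec_assign_text_to_panels; infer_instance

-- ===== CLAIM (what is proved, stated in full; the proofs are below) =====
def Claim_equal_assign_text_to_panels : Prop := ∀ (panels : List (List Int)) (texts : List (List Int)), Dom_assign_text_to_panels panels texts → Pre_assign_text_to_panels panels texts → Spec_assign_text_to_panels panels texts (assign_text_to_panels panels texts)

-- ===== LEMMAS AND PROOFS =====

-- first containing panel of a text, scanning an (index, panel) list with B's containment test
def pvFcB (l : List (Int × List Int)) (t : List Int) : Option Int :=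
  l.findSome? (fun ip => if pvBContains ip.2 t then some ip.1 else none)

-- first containing panel as A computes it (slice + four gets on the panel)
def pvContains (p : List Int) (x0 y0 x1 y1 : Int) : Bool :=
  match PySem.List.pyGet? p 0, PySem.List.pyGet? p 1, PySem.List.pyGet? p 2, PySem.List.pyGet? p 3 with
  | some a, some b, some c, some dd => x0 ≥ a && y0 ≥ b && x1 ≤ c && y1 ≤ dd
  | _, _, _, _ => false

def pvFirstContainer (panels : List (List Int)) (t : List Int) : Option Int :=
  match PySem.List.slice t (some 0) (some 4) with
  | [x0, y0, x1, y1] =>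
      (PySem.List.enumerate panels 0).findSome?
        (fun ip => if pvContains ip.2 x0 y0 x1 y1 then some ip.1 else none)
  | _ => none

-- the (owner, text) pairs of the texts that have an owner, in text order
def pvPairs (panels : List (List Int)) (texts : List (List Int)) : List (Int × List Int) :=
  (texts.filter (fun t => (pvFirstContainer panels t).isSome)).map
    (fun t => ((pvFirstContainer panels t).getD 0, t))

-- a list of length ≥ 4 starts with four elements
theorem pvShape4 (p : List Int) (h : 4 ≤ p.length) :
    ∃ a b c e r, p = a :: b :: c :: e :: r := by
  rcases p with _ | ⟨a, _ | ⟨b, _ | ⟨c, _ | ⟨e, r⟩⟩⟩⟩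
  · simp at h
  · simp at h
  · simp at h
  · simp at h
  · exact ⟨a, b, c, e, r, rfl⟩

theorem pvSlice4 (a b c e : Int) (r : List Int) :
    PySem.List.slice (a :: b :: c :: e :: r) (some 0) (some 4) = [a, b, c, e] := by
  rw [PySem.List.slice_zero_start, PySem.List.slice_to _ (by norm_num)]
  simp

theorem pvGet0 (a b c e : Int) (r : List Int) : PySem.List.pyGet? (a :: b :: c :: e :: r) 0 = some a := by
  unfold PySem.List.pyGet? PySem.List.pyIdx?
  rw [if_pos (by norm_num), if_pos (by simp; omega)]; simp

theorem pvGet1 (a b c e : Int) (r : List Int) : PySem.List.pyGet? (a :: b :: c :: e :: r) 1 = some b := by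
  unfold PySem.List.pyGet? PySem.List.pyIdx?
  rw [if_pos (by norm_num), if_pos (by simp; omega)]; simp

theorem pvGet2 (a b c e : Int) (r : List Int) : PySem.List.pyGet? (a :: b :: c :: e :: r) 2 = some c := by
  unfold PySem.List.pyGet? PySem.List.pyIdx?
  rw [if_pos (by norm_num), if_pos (by simp; omega)]; simp

theorem pvGet3 (a b c e : Int) (r : List Int) : PySem.List.pyGet? (a :: b :: c :: e :: r) 3 = some e := by
  unfold PySem.List.pyGet? PySem.List.pyIdx?
  rw [if_pos (by norm_num), if_pos (by simp; omega)]; simp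

theorem pvContains_cons (a b c e : Int) (r : List Int) (x0 y0 x1 y1 : Int) :
    pvContains (a :: b :: c :: e :: r) x0 y0 x1 y1 = (x0 ≥ a && y0 ≥ b && x1 ≤ c && y1 ≤ e) := by
  rw [pvContains, pvGet0, pvGet1, pvGet2, pvGet3]

-- on a text of length ≥ 4, A's containment test and B's coincide
theorem pvContains_eq_B (p : List Int) (a b c e : Int) (r : List Int) :
    pvContains p a b c e = pvBContains p (a :: b :: c :: e :: r) := by
  unfold pvContains pvBContains
  rw [pvGet0, pvGet1, pvGet2, pvGet3]
  rcases PySem.List.pyGet? p 0 with _ | p0 <;> rcases PySem.List.pyGet? p 1 with _ | p1 <;>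
    rcases PySem.List.pyGet? p 2 with _ | p2 <;> rcases PySem.List.pyGet? p 3 with _ | p3 <;> rfl

-- hence the two "first container" scans coincide on texts of length ≥ 4
theorem pvFC_eq_fcB (panels : List (List Int)) (t : List Int) (ht : 4 ≤ t.length) :
    pvFirstContainer panels t = pvFcB (PySem.List.enumerate panels 0) t := by
  obtain ⟨a, b, c, e, r, rfl⟩ := pvShape4 t ht
  unfold pvFirstContainer pvFcB
  rw [pvSlice4]
  have hred : (match [a, b, c, e] with
      | [x0, y0, x1, y1] =>
        (PySem.List.enumerate panels 0).findSome?
          (fun ip => if pvContains ip.2 x0 y0 x1 y1 then some ip.1 else none)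
      | _ => none)
      = (PySem.List.enumerate panels 0).findSome?
          (fun ip => if pvContains ip.2 a b c e then some ip.1 else none) := rfl
  rw [hred]
  congr 1
  funext ip
  rw [pvContains_eq_B ip.2 a b c e r]

-- ---------- A side: items = grouping by first container ----------

-- the inner break-loop of A is: modify at the first hit of the scan, if any
theorem pvAInner_eq (text : List Int) (xt yt xT yT : Int) :
    ∀ (l : List (Int × List Int)), (∀ ip ∈ l, 4 ≤ ip.2.length) →
    ∀ d, pvAInner text xt yt xT yT l d =
      match l.findSome? (fun ip => if pvContains ip.2 xt yt xT yT then some ip.1 else none) with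
      | some j => d.modify j [] (fun x => x ++ [text])
      | none => d := by
  intro l
  induction l with
  | nil => intro _ d; simp [pvAInner]
  | cons ip rest ih =>
    intro h d
    obtain ⟨a, b, c, e, r, hp⟩ := pvShape4 ip.2 (h ip (by simp))
    obtain ⟨i, pnl⟩ := ip
    simp only at hp
    subst hp
    rw [pvAInner]
    rw [pvSlice4, List.findSome?_cons, pvContains_cons]
    by_cases hc : (xt ≥ a && yt ≥ b && xT ≤ c && yT ≤ e) = true
    · simp [hc]
    · simp only [Bool.not_eq_true] at hc
      simp only [hc, if_neg Bool.false_ne_true]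
      exact ih (fun q hq => h q (by simp [hq])) d

-- A's per-text step under Pre_: modify the owner's entry, if the text has one
theorem pvStep_eq (panels : List (List Int)) (t : List Int) (ht : 4 ≤ t.length)
    (hp : ∀ p ∈ panels, 4 ≤ p.length) (d : PySem.Dict Int (List (List Int))) :
    (match PySem.List.slice t (some 0) (some 4) with
      | [xt, yt, xT, yT] => pvAInner t xt yt xT yT (PySem.List.enumerate panels 0) d
      | _ => d) =
    match pvFirstContainer panels t with
    | some j => d.modify j [] (fun x => x ++ [t])
    | none => d := by
  obtain ⟨a, b, c, e, r, rfl⟩ := pvShape4 t ht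
  have h1 : (match PySem.List.slice (a :: b :: c :: e :: r) (some 0) (some 4) with
      | [xt, yt, xT, yT] =>
          pvAInner (a :: b :: c :: e :: r) xt yt xT yT (PySem.List.enumerate panels 0) d
      | _ => d)
      = pvAInner (a :: b :: c :: e :: r) a b c e (PySem.List.enumerate panels 0) d := by
    rw [pvSlice4]
  have h2 : pvFirstContainer panels (a :: b :: c :: e :: r)
      = (PySem.List.enumerate panels 0).findSome?
          (fun ip => if pvContains ip.2 a b c e then some ip.1 else none) := by
    unfold pvFirstContainer
    rw [pvSlice4]
  rw [h1, h2]
  exact pvAInner_eq _ _ _ _ _ _ (by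
    intro ip hip
    rw [PySem.List.mem_enumerate_iff] at hip
    obtain ⟨k, hk, rfl⟩ := hip
    exact hp _ (List.getElem_mem hk)) d

-- the whole text loop of A, as a grouping fold over pvPairs
theorem pvFold_eq (panels : List (List Int)) (texts : List (List Int))
    (ht : ∀ t ∈ texts, 4 ≤ t.length) (hp : ∀ p ∈ panels, 4 ≤ p.length) :
    ∀ d, texts.foldl (fun d text =>
        match PySem.List.slice text (some 0) (some 4) with
        | [xt, yt, xT, yT] => pvAInner text xt yt xT yT (PySem.List.enumerate panels 0) d
        | _ => d) d =
      (pvPairs panels texts).foldl (fun d p => d.modify p.1 [] (fun x => x ++ [p.2])) d := by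
  induction texts with
  | nil => intro d; simp [pvPairs]
  | cons t ts ih =>
    intro d
    rw [List.foldl_cons, pvStep_eq panels t (ht t (by simp)) hp d]
    have ih' := ih (fun u hu => ht u (by simp [hu]))
    cases h : pvFirstContainer panels t with
    | none => simp [pvPairs, h] at ih' ⊢; exact ih' d
    | some j => simp [pvPairs, h] at ih' ⊢; exact ih' _

-- the initial dict {i: [] for i in range(len(panels))}
theorem pvInit_items (n : Nat) :
    ((PySem.List.pyRange 0 n 1).foldl (fun d i => d.insert i []) PySem.Dict.empty
      : PySem.Dict Int (List (List Int))).items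
    = (PySem.List.pyRange 0 n 1).map (fun i => (i, [])) := by
  have h := PySem.Dict.items_foldl_insert_fresh (PySem.List.pyRange 0 (n : Int) 1)
    (fun i => i) (fun _ => ([] : List (List Int))) PySem.Dict.empty
    (fun a _ => PySem.Dict.contains_empty a)
    (by simpa using PySem.List.nodup_pyRange_one 0 n)
  simpa using h

theorem pvInit_keys (n : Nat) :
    ((PySem.List.pyRange 0 n 1).foldl (fun d i => d.insert i []) PySem.Dict.empty
      : PySem.Dict Int (List (List Int))).keys = PySem.List.pyRange 0 n 1 := by
  simp only [PySem.Dict.keys, pvInit_items n]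
  simp [Function.comp_def]

theorem pvInit_getD (n : Nat) (k : Int) :
    ((PySem.List.pyRange 0 n 1).foldl (fun d i => d.insert i []) PySem.Dict.empty
      : PySem.Dict Int (List (List Int))).getD k [] = [] := by
  set d := ((PySem.List.pyRange 0 n 1).foldl (fun d i => d.insert i []) PySem.Dict.empty
      : PySem.Dict Int (List (List Int))) with hd
  by_cases hc : d.contains k = true
  · rw [PySem.Dict.contains_iff_mem_keys, pvInit_keys n] at hc
    have hmem : (k, ([] : List (List Int))) ∈ d.items := by
      rw [hd, pvInit_items n]
      exact List.mem_map.mpr ⟨k, hc, rfl⟩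
    exact PySem.Dict.getD_of_mem_items d hmem
      (by rw [pvInit_keys n]; exact PySem.List.nodup_pyRange_one 0 n) []
  · exact PySem.Dict.getD_of_not_contains d [] (by simpa using hc)

theorem pvSetUpdate_self {s : PySem.Set Int} {xs : List Int} (h : ∀ x ∈ xs, x ∈ s) :
    PySem.Set.update s xs = s := by
  induction xs generalizing s with
  | nil => rfl
  | cons x xs ih =>
    have hx : PySem.Set.add s x = s := by
      unfold PySem.Set.add
      rw [if_pos ((PySem.Set.contains_iff s x).mpr (h x (by simp)))]
    show PySem.Set.update (PySem.Set.add s x) xs = s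
    rw [hx]
    exact ih (fun y hy => h y (by simp [hy]))

-- every owner index lies in range(len(panels))
theorem pvOwner_mem (panels : List (List Int)) (t : List Int) (j : Int)
    (h : pvFirstContainer panels t = some j) : j ∈ PySem.List.pyRange 0 panels.length 1 := by
  unfold pvFirstContainer at h
  rcases hs : PySem.List.slice t (some 0) (some 4) with _ | ⟨x0, l1⟩ <;> rw [hs] at h
  · simp at h
  rcases l1 with _ | ⟨y0, l2⟩ <;> [skip; rcases l2 with _ | ⟨x1, l3⟩] <;>
    [simp at h; skip; rcases l3 with _ | ⟨y1, l4⟩] <;> [skip; simp at h; rcases l4 with _ | ⟨z, l5⟩]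
  · simp at h
  · obtain ⟨ip, hip, hcond⟩ := List.exists_of_findSome?_eq_some h
    split at hcond
    · have hj : ip.1 = j := by simpa using hcond
      rw [PySem.List.mem_enumerate_iff] at hip
      obtain ⟨k, hk, hip'⟩ := hip
      have : ip.1 = 0 + (k : Int) := by rw [hip']
      simp only [PySem.List.mem_pyRange_one]
      omega
    · exact absurd hcond (by simp)
  · simp at h

-- group the pairs of one owner = filter by first container
theorem pvGroupFC (panels : List (List Int)) (texts : List (List Int)) (i : Int) :
    ((pvPairs panels texts).filter (fun p => p.1 == i)).map (fun x => x.2)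
    = texts.filter (fun t => pvFirstContainer panels t == some i) := by
  induction texts with
  | nil => simp [pvPairs]
  | cons t ts ih =>
    cases h : pvFirstContainer panels t with
    | none => simp [pvPairs, h] at ih ⊢; exact ih
    | some j =>
      by_cases hj : j = i
      · subst hj
        simp [pvPairs, h] at ih ⊢
        exact ih
      · simp [pvPairs, h, hj] at ih ⊢
        exact ih

-- A in normal form: items grouped by first container, over range(len(panels))
theorem pvA_norm (panels : List (List Int)) (texts : List (List Int))
    (ht : ∀ t ∈ texts, 4 ≤ t.length) (hp : ∀ p ∈ panels, 4 ≤ p.length) :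
    assign_text_to_panels panels texts
    = (PySem.List.pyRange 0 panels.length 1).map
        (fun i => (i, texts.filter (fun t => pvFirstContainer panels t == some i))) := by
  unfold assign_text_to_panels
  dsimp only
  rw [pvFold_eq panels texts ht hp]
  set init := ((PySem.List.pyRange 0 panels.length 1).foldl (fun d i => d.insert i [])
      PySem.Dict.empty : PySem.Dict Int (List (List Int))) with hinit
  set final := (pvPairs panels texts).foldl (fun d p => d.modify p.1 [] (fun x => x ++ [p.2])) init
    with hfinal
  have hkeys : final.keys = PySem.List.pyRange 0 panels.length 1 := by
    rw [hfinal, PySem.Dict.keys_foldl_modify_key (pvPairs panels texts) (fun p => p.1) []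
      (fun _ p v => v ++ [p.2]) init]
    rw [hinit, pvInit_keys panels.length]
    apply pvSetUpdate_self
    intro x hx
    rw [List.mem_map] at hx
    obtain ⟨p, hp', rfl⟩ := hx
    unfold pvPairs at hp'
    rw [List.mem_map] at hp'
    obtain ⟨u, hu, rfl⟩ := hp'
    have hmem := List.of_mem_filter hu
    cases ho : pvFirstContainer panels u with
    | none => rw [ho] at hmem; simp at hmem
    | some j => simpa using pvOwner_mem panels u j ho
  have hnd : final.keys.Nodup := by rw [hkeys]; exact PySem.List.nodup_pyRange_one 0 panels.length
  rw [PySem.Dict.items_eq_map_keys final hnd [], hkeys]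
  apply List.map_congr_left
  intro i _
  rw [hfinal, PySem.Dict.getD_foldl_modify_append (pvPairs panels texts) init i,
    hinit, pvInit_getD panels.length i]
  rw [List.nil_append]
  exact congrArg _ (pvGroupFC panels texts i)

-- ---------- B side: items = grouping by first container ----------

-- the partition loop, with its two append-accumulators made explicit
theorem pvBSplit_acc (panel : List Int) (remaining : List (List Int)) :
    ∀ m r, remaining.foldl (fun acc text =>
        if pvBContains panel text then (acc.1 ++ [text], acc.2) else (acc.1, acc.2 ++ [text]))
      (m, r)
    = (m ++ remaining.filter (fun t => pvBContains panel t),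
       r ++ remaining.filter (fun t => !pvBContains panel t)) := by
  induction remaining with
  | nil => intro m r; simp
  | cons t ts ih =>
    intro m r
    by_cases h : pvBContains panel t = true
    · simp [h, ih]
    · simp only [Bool.not_eq_true] at h
      simp [h, ih]

theorem pvBSplit_eq (panel : List Int) (remaining : List (List Int)) :
    pvBSplit panel remaining
    = (remaining.filter (fun t => pvBContains panel t),
       remaining.filter (fun t => !pvBContains panel t)) := by
  unfold pvBSplit
  simpa using pvBSplit_acc panel remaining [] []

-- B's outer fold over any fresh, distinct (index, panel) list appends one group per panel,
-- the group being the remaining texts whose first container in that suffix is this panel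
theorem pvBFold_items (l : List (Int × List Int)) :
    ∀ (d : PySem.Dict Int (List (List Int))) (rem : List (List Int)),
    (∀ ip ∈ l, d.contains ip.1 = false) → (l.map (fun ip => ip.1)).Nodup →
    ((l.foldl (fun (st : PySem.Dict Int (List (List Int)) × List (List Int)) ip =>
        let mr := pvBSplit ip.2 st.2
        (st.1.insert ip.1 mr.1, mr.2)) (d, rem)).1).items
    = d.items ++ l.map (fun ip => (ip.1, rem.filter (fun t => pvFcB l t == some ip.1))) := by
  induction l with
  | nil => intro d rem _ _; simp
  | cons ip rest ih =>
    intro d rem hfresh hnd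
    obtain ⟨i, p⟩ := ip
    simp only [List.map_cons, List.nodup_cons] at hnd
    obtain ⟨hi, hndr⟩ := hnd
    rw [List.foldl_cons]
    have hstep : (let mr := pvBSplit (i, p).2 (d, rem).2
        ((d, rem).1.insert (i, p).1 mr.1, mr.2))
        = (d.insert i (rem.filter (fun t => pvBContains p t)),
           rem.filter (fun t => !pvBContains p t)) := by
      simp [pvBSplit_eq]
    rw [hstep]
    have hfresh' : ∀ jp ∈ rest, (d.insert i (rem.filter (fun t => pvBContains p t))).contains jp.1 = false := by
      intro jp hjp
      rw [PySem.Dict.contains_insert]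
      have h1 : (jp.1 == i) = false := by
        simp only [beq_eq_false_iff_ne]
        intro he
        exact hi (he ▸ List.mem_map.mpr ⟨jp, hjp, rfl⟩)
      rw [h1, hfresh jp (by simp [hjp])]
      rfl
    rw [ih _ _ hfresh' hndr]
    rw [PySem.Dict.items_insert_of_not_contains _ _ (hfresh (i, p) (by simp))]
    rw [List.append_assoc]
    congr 1
    -- remaining goal: [(i, mine)] ++ rest-groups over filtered rem = cons-groups over rem
    have hfc_cons : ∀ t, pvFcB ((i, p) :: rest) t
        = if pvBContains p t then some i else pvFcB rest t := by
      intro t; unfold pvFcB; rw [List.findSome?_cons]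
      cases h : pvBContains p t
      · simp
      · simp
    have hmem_fst : ∀ t j, pvFcB rest t = some j → j ∈ rest.map (fun ip => ip.1) := by
      intro t j hj
      obtain ⟨q, hq, hcond⟩ := List.exists_of_findSome?_eq_some hj
      split at hcond
      · exact (by simpa using hcond : q.1 = j) ▸ List.mem_map.mpr ⟨q, hq, rfl⟩
      · exact absurd hcond (by simp)
    rw [List.singleton_append, List.map_cons]
    congr 1
    · -- head group: filter by (pvFcB cons == some i) equals filter by pvBContains p
      congr 1
      apply List.filter_congr
      intro t _
      rw [hfc_cons t]
      by_cases h : pvBContains p t = true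
      · simp [h]
      · simp only [Bool.not_eq_true] at h
        simp only [h, if_neg Bool.false_ne_true]
        cases hj : pvFcB rest t with
        | none => simp
        | some j =>
          have : j ≠ i := fun he => hi (he ▸ hmem_fst t j hj)
          simp [this]
    · -- tail groups: filtering the not-contained remainder = filtering rem by the cons-scan
      apply List.map_congr_left
      intro jp hjp
      have hji : jp.1 ≠ i := fun he => hi (he ▸ List.mem_map.mpr ⟨jp, hjp, rfl⟩)
      congr 1
      rw [List.filter_filter]
      apply List.filter_congr
      intro t _
      rw [hfc_cons t]
      cases h : pvBContains p t
      · simp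
      · have hne : i ≠ jp.1 := fun he => hji he.symm
        simp [hne]

-- B in normal form
theorem pvB_norm (panels : List (List Int)) (texts : List (List Int)) :
    assign_text_to_panels_alt panels texts
    = (PySem.List.pyRange 0 panels.length 1).map
        (fun i => (i, texts.filter (fun t => pvFcB (PySem.List.enumerate panels 0) t == some i))) := by
  unfold assign_text_to_panels_alt
  have hnd : ((PySem.List.enumerate panels 0).map (fun ip => ip.1)).Nodup := by
    rw [PySem.List.map_fst_enumerate]
    exact PySem.List.nodup_pyRange_one 0 (0 + panels.length)
  rw [pvBFold_items (PySem.List.enumerate panels 0) PySem.Dict.empty texts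
    (fun ip _ => PySem.Dict.contains_empty ip.1) hnd]
  have hemp : (PySem.Dict.empty : PySem.Dict Int (List (List Int))).items = [] := rfl
  rw [hemp, List.nil_append]
  -- turn the map over enumerate into a map over pyRange: both are (index ↦ (index, group index))
  have hmm : (PySem.List.enumerate panels 0).map
      (fun ip => (ip.1, texts.filter (fun t => pvFcB (PySem.List.enumerate panels 0) t == some ip.1)))
      = ((PySem.List.enumerate panels 0).map (fun ip => ip.1)).map
        (fun i => (i, texts.filter (fun t => pvFcB (PySem.List.enumerate panels 0) t == some i))) := by
    rw [List.map_map]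
    rfl
  rw [hmm, PySem.List.map_fst_enumerate]
  norm_num

-- ===== VERDICT (by name: the statement is the Claim_ definition above) =====
theorem assign_text_to_panels_spec : Claim_equal_assign_text_to_panels := by
  intro panels texts _ hpre
  obtain ⟨ht, hp⟩ := hpre
  unfold Spec_assign_text_to_panels
  rcases hp with rfl | hp
  · -- texts = []: every group is empty on both sides
    rw [pvB_norm panels []]
    unfold assign_text_to_panels
    dsimp only
    rw [List.foldl_nil, pvInit_items panels.length]
    simp
  · rw [pvA_norm panels texts ht hp, pvB_norm panels texts]
    apply List.map_congr_left
    intro i _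
    congr 1
    apply List.filter_congr
    intro t htm
    rw [pvFC_eq_fcB panels t (ht t htm)]
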